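-- pv_equiv track=rewrite | github.com/marinabar/Semestre1Algorithmique | TP7/7.10.py | coupei
-- ===== SOURCE A (Python) =====
-- def coupei(s):
--
--     mini=s[0]
--     for i in range(1, len(s)):
--         if mini + s[i]>mini:
--             return mini
--         else:
--             mini=mini + s[i]
--
--     return mini
-- ===== SOURCE B (Python) =====
-- def coupei(s):
--     cut = next((i for i in range(1, len(s)) if s[i] > 0), len(s))
--     return sum(s[:cut])
-- ===== Notes on version B (the rewrite author's own statement) =====
-- stated objective: simpler
-- what changed: B replaces A's fused accumulate-and-early-return loop by: find the first index i >= 1 with s[i] > 0 (integers, so 'mini + s[i] > mini' is exactly 's[i] > 0'), then return sum(s[:cut]) in one slice-sum.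
-- outside the precondition, e.g. on coupei([]): A raises IndexError, B returns 0
import Mathlib
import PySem

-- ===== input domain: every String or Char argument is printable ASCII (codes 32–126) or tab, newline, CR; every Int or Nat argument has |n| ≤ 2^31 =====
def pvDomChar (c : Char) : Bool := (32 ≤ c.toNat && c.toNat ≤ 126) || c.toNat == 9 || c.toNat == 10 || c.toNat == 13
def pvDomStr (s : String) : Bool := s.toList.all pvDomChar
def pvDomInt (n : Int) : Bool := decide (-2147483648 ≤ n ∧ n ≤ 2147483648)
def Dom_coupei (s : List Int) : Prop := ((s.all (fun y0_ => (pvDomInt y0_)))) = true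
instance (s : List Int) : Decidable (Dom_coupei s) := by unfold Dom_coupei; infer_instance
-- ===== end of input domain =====

-- B: find the first index i ≥ 1 with s[i] > 0, then sum the prefix before it (simpler decomposition).

-- ===== PORT A =====
-- A's loop over range(1, len(s)) with running sum `mini` and early return, as structural recursion on the tail.
def coupeiLoop (mini : Int) : List Int → Int
  | [] => mini
  | x :: xs => if mini + x > mini then mini else coupeiLoop (mini + x) xs

def coupei (s : List Int) : Int :=
  match s with
  | [] => 0  -- Python raises IndexError here (s[0]); excluded by Pre_coupei
  | h :: t => coupeiLoop h t

-- ===== PORT B =====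
-- Source B: cut = next((i for i in range(1, len(s)) if s[i] > 0), len(s)); return sum(s[:cut])
def coupei_alt (s : List Int) : Int :=
  let cut : Nat :=
    match (s.drop 1).findIdx? (fun x => decide (0 < x)) with
    | some j => j + 1
    | none => s.length
  (s.take cut).sum

-- ===== PRECONDITION & SPEC =====
-- Pre_ excludes only the empty list, on which Python A raises IndexError.
def Pre_coupei (s : List Int) : Prop := s ≠ []
instance (s : List Int) : Decidable (Pre_coupei s) := by unfold Pre_coupei; infer_instance
def pvWitness_coupei : List Int := ([-2, -3, 5, 1])

def Spec_coupei (s : List Int) (out : Int) : Prop := out = coupei_alt s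
instance (s : List Int) (out : Int) : Decidable (Spec_coupei s out) := by unfold Spec_coupei; infer_instance

-- ===== CLAIM (what is proved, stated in full; the proofs are below) =====
def Claim_equal_coupei : Prop := ∀ (s : List Int), Dom_coupei s → Pre_coupei s → Spec_coupei s (coupei s)

-- ===== LEMMAS AND PROOFS =====
-- A's loop starting from m on tail t returns m plus the sum of t up to (excluding) its first positive element.
lemma coupeiLoop_eq (t : List Int) : ∀ m : Int,
    coupeiLoop m t =
      m + (t.take (match t.findIdx? (fun x => decide (0 < x)) with
                   | some j => j
                   | none => t.length)).sum := by
  induction t with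
  | nil => intro m; simp [coupeiLoop]
  | cons x xs ih =>
    intro m
    by_cases hx : 0 < x
    · simp [coupeiLoop, List.findIdx?_cons, hx]
    · have hmx : ¬ (m + x > m) := by omega
      simp only [coupeiLoop, if_neg hmx, List.findIdx?_cons, decide_eq_true_eq, hx, if_false,
        ih (m + x)]
      cases hfi : xs.findIdx? (fun x => decide (0 < x)) with
      | some j => simp [List.take_succ_cons]; ring
      | none => simp [List.take_succ_cons]; ring

-- ===== VERDICT (by name: the statement is the Claim_ definition above) =====
theorem coupei_spec : Claim_equal_coupei := by
  intro s _ hpre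
  cases s with
  | nil => exact absurd rfl hpre
  | cons h t =>
    show coupeiLoop h t =
      (List.take (match t.findIdx? (fun x => decide (0 < x)) with
                  | some j => j + 1
                  | none => t.length + 1) (h :: t)).sum
    rw [coupeiLoop_eq]
    cases hfi : t.findIdx? (fun x => decide (0 < x)) with
    | some j => simp only [List.take_succ_cons, List.sum_cons]
    | none => simp only [List.take_succ_cons, List.sum_cons]
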